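-- pv_equiv track=rewrite | github.com/CoffeeAndConvexity/GUARD | solvers/double_oracle_sf_deprecated.py | generate_defender_actions
-- ===== SOURCE A (Python) =====
-- import itertools
--
-- def generate_defender_actions(schedule_dict):
--     """
--     Generates all possible joint defender actions from a dictionary mapping
--     each defender to their list of (schedule, cost) tuples.
--
--     Defenders with no schedules are assigned an empty set as a placeholder.
--
--     Returns:
--         defender_actions: list of lists of sets (each inner list is one full defender action)
--     """
--     sorted_defenders = sorted(schedule_dict.keys())
--
--     # Use a default empty set if a defender has no available schedules
--     schedule_lists = [
--         schedule_dict[d] if schedule_dict[d] else [({}, 0)]  # dummy no-op schedule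
--         for d in sorted_defenders
--     ]
--
--     all_combinations = list(itertools.product(*schedule_lists))
--     defender_actions = []
--
--     for combo in all_combinations:
--         schedules = [item[0] for item in combo]  # Extract schedule (ignore cost)
--         defender_actions.append(schedules)
--
--     return defender_actions
-- ===== SOURCE B (Python) =====
-- def generate_defender_actions(schedule_dict):
--     """Recursive Cartesian product that extracts schedules on the fly,
--     instead of itertools.product over (schedule, cost) pairs plus a second pass."""
--     sorted_defenders = sorted(schedule_dict.keys())
--     schedule_lists = [
--         schedule_dict[d] if schedule_dict[d] else [({}, 0)]
--         for d in sorted_defenders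
--     ]
--
--     def rec(lists):
--         if not lists:
--             return [[]]
--         rest = rec(lists[1:])
--         return [[sched] + tail for (sched, _cost) in lists[0] for tail in rest]
--
--     return rec(schedule_lists)
-- ===== Notes on version B (the rewrite author's own statement) =====
-- stated objective: alternative
-- what changed: Replaces itertools.product over (schedule, cost) pairs plus a separate extraction pass by a single right-recursive Cartesian-product function that emits schedules directly (cost dropped on the fly).
import Mathlib
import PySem

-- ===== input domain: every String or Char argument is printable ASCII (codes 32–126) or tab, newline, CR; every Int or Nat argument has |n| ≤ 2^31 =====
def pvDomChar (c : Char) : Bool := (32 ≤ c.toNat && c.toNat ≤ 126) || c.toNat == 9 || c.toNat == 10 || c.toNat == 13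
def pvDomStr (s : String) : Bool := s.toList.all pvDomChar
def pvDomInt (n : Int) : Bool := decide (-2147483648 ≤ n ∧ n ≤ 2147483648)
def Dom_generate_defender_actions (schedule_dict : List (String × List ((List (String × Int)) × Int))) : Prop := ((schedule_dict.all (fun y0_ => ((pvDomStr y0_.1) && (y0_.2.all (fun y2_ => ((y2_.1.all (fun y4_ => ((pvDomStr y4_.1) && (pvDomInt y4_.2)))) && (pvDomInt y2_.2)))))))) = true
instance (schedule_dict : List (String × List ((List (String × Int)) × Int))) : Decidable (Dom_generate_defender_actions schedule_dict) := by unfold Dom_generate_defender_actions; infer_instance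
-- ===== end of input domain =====

-- B fuses itertools.product with the schedule extraction into one right-recursion (alternative decomposition).

-- ===== PORT A =====
-- itertools.product, ported as its documented forward accumulation: result = [[]]; for pool: result = [x+[y] for x in result for y in pool]
def pyProductStep {α : Type} (acc : List (List α)) (pool : List α) : List (List α) :=
  acc.flatMap (fun x => pool.map (fun y => x ++ [y]))

def pyProduct {α : Type} (pools : List (List α)) : List (List α) :=
  pools.foldl pyProductStep [[]]

def generate_defender_actions (schedule_dict : List (String × List ((List (String × Int)) × Int))) : List (List (List (String × Int))) :=
  let d := PySem.Dict.ofList schedule_dict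
  let sorted_defenders := PySem.List.sorted d.keys (fun x => x) false
  let schedule_lists := sorted_defenders.map (fun k =>
    let v := d.getD k []
    if v = [] then [([], 0)] else v)
  let all_combinations := pyProduct schedule_lists
  all_combinations.foldl (fun da combo => da ++ [combo.map Prod.fst]) []

-- ===== PORT B =====
-- rec(lists) of Source B: right recursion producing the schedules directly (cost dropped on the fly)
def prodFst (lists : List (List ((List (String × Int)) × Int))) : List (List (List (String × Int))) :=
  match lists with
  | [] => [[]]
  | l :: rest =>
    let r := prodFst rest
    l.flatMap (fun p => r.map (fun tail => p.1 :: tail))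

def generate_defender_actions_alt (schedule_dict : List (String × List ((List (String × Int)) × Int))) : List (List (List (String × Int))) :=
  let d := PySem.Dict.ofList schedule_dict
  let sorted_defenders := PySem.List.sorted d.keys (fun x => x) false
  let schedule_lists := sorted_defenders.map (fun k =>
    let v := d.getD k []
    if v = [] then [([], 0)] else v)
  prodFst schedule_lists

-- ===== PRECONDITION & SPEC =====
def Spec_generate_defender_actions (schedule_dict : List (String × List ((List (String × Int)) × Int))) (out : List (List (List (String × Int)))) : Prop := out = generate_defender_actions_alt schedule_dict
instance (schedule_dict : List (String × List ((List (String × Int)) × Int))) (out : List (List (List (String × Int)))) : Decidable (Spec_generate_defender_actions schedule_dict out) := by unfold Spec_generate_defender_actions; infer_instance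

-- ===== CLAIM (what is proved, stated in full; the proofs are below) =====
def Claim_equal_generate_defender_actions : Prop := ∀ (schedule_dict : List (String × List ((List (String × Int)) × Int))), Dom_generate_defender_actions schedule_dict → Spec_generate_defender_actions schedule_dict (generate_defender_actions schedule_dict)

-- ===== LEMMAS AND PROOFS =====

-- the right-fold product over full (schedule, cost) pairs
def foldrProd {α : Type} (pools : List (List α)) : List (List α) :=
  pools.foldr (fun l r => l.flatMap (fun y => r.map (y :: ·))) [[]]

lemma foldl_pyProductStep (pools : List (List α)) :
    ∀ acc : List (List α),
      pools.foldl pyProductStep acc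
        = acc.flatMap (fun x => (foldrProd pools).map (fun t => x ++ t)) := by
  induction pools with
  | nil => intro acc; simp [foldrProd]
  | cons l rest ih =>
    intro acc
    simp only [List.foldl_cons, ih, foldrProd, List.foldr_cons, pyProductStep,
      List.flatMap_assoc]
    congr 1; funext x
    simp [List.flatMap_map, List.map_flatMap, List.map_map, Function.comp_def,
      List.append_assoc]

lemma prodFst_eq_map_foldrProd (pools : List (List ((List (String × Int)) × Int))) :
    prodFst pools = (foldrProd pools).map (List.map Prod.fst) := by
  induction pools with
  | nil => simp [prodFst, foldrProd]
  | cons l rest ih =>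
    simp [prodFst, foldrProd, ih, List.map_flatMap, List.map_map, Function.comp_def]

-- ===== VERDICT (by name: the statement is the Claim_ definition above) =====
theorem generate_defender_actions_spec : Claim_equal_generate_defender_actions := by
  intro sd _
  show _ = _
  unfold generate_defender_actions generate_defender_actions_alt pyProduct
  simp only [foldl_pyProductStep, PySem.List.foldl_append_singleton_eq_map,
    prodFst_eq_map_foldrProd]
  simp
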